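-- pv_equiv track=rewrite | github.com/highjoon/coding-test | this-is-coding-test/4-1.py | solution
-- ===== SOURCE A (Python) =====
-- def solution(N, data):
-- 	x = 1
-- 	y = 1
--
-- 	for coord in data:
-- 		if coord == 'R':
-- 			if y + 1 > N:
-- 				continue
-- 			else:
-- 				y += 1
--
-- 		if coord == 'U':
-- 			if x - 1 < 1:
-- 				continue
-- 			else:
-- 				x -= 1
--
-- 		if coord == 'L':
-- 			if y - 1 < 1:
-- 				continue
-- 			else:
-- 				y -= 1
--
-- 		if coord == 'D':
-- 			if x + 1 > N:
-- 				continue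
-- 			else:
-- 				x += 1
--
--
-- 	return str(x) + ' ' + str(y)
-- ===== SOURCE B (Python) =====
-- def _walk(N, data, start, inc, dec):
--     # 1D bounded walk on [1, N]: inc moves +1, dec moves -1, anything else is a no-op
--     pos = start
--     for c in data:
--         if c == inc and pos < N:
--             pos += 1
--         elif c == dec and pos > 1:
--             pos -= 1
--     return pos
--
-- def solution(N, data):
--     # The two axes are independent: row x only reacts to U/D, column y only to R/L.
--     x = _walk(N, data, 1, 'D', 'U')
--     y = _walk(N, data, 1, 'R', 'L')
--     return str(x) + ' ' + str(y)
-- ===== Notes on version B (the rewrite author's own statement) =====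
-- stated objective: alternative
-- what changed: Decomposes the 2D simulation into two independent 1D bounded walks (axis separation): one pass over the commands computes the row from U/D only, a second pass computes the column from R/L only, each via a single generic 1D-walk helper instead of four coupled guard-and-continue branches on a shared (x,y) state.
import Mathlib
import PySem

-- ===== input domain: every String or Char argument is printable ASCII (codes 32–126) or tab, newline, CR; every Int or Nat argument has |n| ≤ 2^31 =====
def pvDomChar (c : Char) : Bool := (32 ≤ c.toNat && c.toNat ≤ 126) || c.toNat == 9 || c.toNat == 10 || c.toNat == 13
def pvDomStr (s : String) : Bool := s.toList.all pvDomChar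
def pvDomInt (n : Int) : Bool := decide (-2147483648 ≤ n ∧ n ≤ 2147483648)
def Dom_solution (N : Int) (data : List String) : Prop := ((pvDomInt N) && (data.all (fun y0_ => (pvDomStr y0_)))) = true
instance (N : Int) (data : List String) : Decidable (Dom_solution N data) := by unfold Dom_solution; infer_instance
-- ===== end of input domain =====

-- B decomposes A's single coupled 2D simulation into two independent 1D bounded walks
-- (row from U/D, column from R/L), each a separate pass of a generic 1D-walk helper.

-- ===== PORT A =====
-- one loop iteration of A: the four sequential guard-and-continue if-blocks on shared (x, y)
def stepA (N : Int) (s : Int × Int) (coord : String) : Int × Int :=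
  let x := s.1
  let y := s.2
  let y := if coord == "R" then (if y + 1 > N then y else y + 1) else y
  let x := if coord == "U" then (if x - 1 < 1 then x else x - 1) else x
  let y := if coord == "L" then (if y - 1 < 1 then y else y - 1) else y
  let x := if coord == "D" then (if x + 1 > N then x else x + 1) else x
  (x, y)

def solution (N : Int) (data : List String) : String :=
  let s := data.foldl (stepA N) (1, 1)
  PySem.Int.toStr s.1 ++ " " ++ PySem.Int.toStr s.2

-- ===== PORT B =====
-- generic 1D bounded walk on [1, N]: inc moves +1, dec moves -1, anything else is a no-op
def walk1 (N : Int) (data : List String) (start : Int) (inc dec : String) : Int :=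
  data.foldl
    (fun pos c =>
      if c == inc && pos < N then pos + 1
      else if c == dec && pos > 1 then pos - 1
      else pos)
    start

def solution_alt (N : Int) (data : List String) : String :=
  let x := walk1 N data 1 "D" "U"
  let y := walk1 N data 1 "R" "L"
  PySem.Int.toStr x ++ " " ++ PySem.Int.toStr y

-- ===== PRECONDITION & SPEC =====
def Spec_solution (N : Int) (data : List String) (out : String) : Prop := out = solution_alt N data
instance (N : Int) (data : List String) (out : String) : Decidable (Spec_solution N data out) := by unfold Spec_solution; infer_instance

-- ===== CLAIM (what is proved, stated in full; the proofs are below) =====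
def Claim_equal_solution : Prop := ∀ (N : Int) (data : List String), Dom_solution N data → Spec_solution N data (solution N data)

-- ===== LEMMAS AND PROOFS =====

def stepX (N : Int) (pos : Int) (c : String) : Int :=
  if c == "D" && pos < N then pos + 1 else if c == "U" && pos > 1 then pos - 1 else pos

def stepY (N : Int) (pos : Int) (c : String) : Int :=
  if c == "R" && pos < N then pos + 1 else if c == "L" && pos > 1 then pos - 1 else pos

theorem stepA_split (N : Int) (s : Int × Int) (c : String) :
    stepA N s c = (stepX N s.1 c, stepY N s.2 c) := by
  by_cases hR : c = "R" <;> by_cases hU : c = "U" <;> by_cases hL : c = "L" <;>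
    by_cases hD : c = "D" <;>
    simp_all [stepA, stepX, stepY, Prod.ext_iff] <;> omega

theorem fold_split (N : Int) (data : List String) (s : Int × Int) :
    data.foldl (stepA N) s = (data.foldl (stepX N) s.1, data.foldl (stepY N) s.2) := by
  induction data generalizing s with
  | nil => rfl
  | cons c rest ih => simp only [List.foldl_cons, stepA_split, ih]

-- ===== VERDICT (by name: the statement is the Claim_ definition above) =====
theorem solution_spec : Claim_equal_solution := by
  intro N data _
  show solution N data = solution_alt N data
  simp only [solution, solution_alt, fold_split, walk1]
  rfl
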